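-- pv_equiv track=rewrite | github.com/raeez/chiral-bar-cobar | compute/lib/cumulant_algebra.py | cumulant_inversion
-- ===== SOURCE A (Python) =====
-- from math import factorial, log
-- from typing import Any, Dict, List, Optional
--
-- def generalized_binom(q: int, m: int) -> int:
--     """Generalized binomial coefficient binom(q + m - 1, m) for integer q.
--
--     This is the number of ways to choose an unordered multiset of size m
--     from q distinct elements (with repetition).  For q >= 0, this is the
--     standard multiset coefficient.  For q < 0, we use the polynomial
--     extension: binom(q+m-1, m) = prod_{j=0}^{m-1} (q+m-1-j) / m!.
--
--     Mathematical context: this appears as the multiplicity factor in the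
--     cofree coalgebra dimension formula.  When q < 0 (which occurs for
--     algebras like sl_2 whose H^2 has a correction), the generalized
--     binomial is negative, reflecting a DEFECT in the cofree recognition.
--     """
--     if m == 0:
--         return 1
--     if m < 0:
--         return 0
--     # Compute product (q+m-1)(q+m-2)...(q) / m!
--     numerator = 1
--     for j in range(m):
--         numerator *= (q + m - 1 - j)
--     return numerator // factorial(m)
--
-- def cofree_dimensions(cumulant_dims: Dict[int, int], max_degree: int = 12) -> Dict[int, int]:
--     """Forward Euler transform: cumulant dimensions -> bar cohomology dimensions.
--
--     Given cumulant dimensions q_n = dim Q(A)_n, compute the dimensions b_n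
--     of the cofree coalgebra T^c(Q(A)) at each bar degree n.
--
--     The generating function identity is:
--
--         sum_{n >= 0} b_n x^n = prod_{k >= 1} 1/(1 - x^k)^{q_k}
--
--     where b_0 = 1 (the counit).  We return {n: b_n} for n = 1, ..., max_degree.
--
--     Implementation: dynamic programming.  Process each degree k in order,
--     multiplying the current power series by 1/(1-x^k)^{q_k} = sum_{m >= 0}
--     binom(q_k + m - 1, m) x^{km}.
--
--     This is the EULER TRANSFORM when all q_k >= 0; the generalized binomial
--     extends it to arbitrary integer q_k.
--     """
--     dp = [0] * (max_degree + 1)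
--     dp[0] = 1
--
--     for k in range(1, max_degree + 1):
--         qk = cumulant_dims.get(k, 0)
--         if qk == 0:
--             continue
--         # Multiply by 1/(1-x^k)^{qk} = sum_{m>=0} binom(qk+m-1, m) x^{km}
--         new_dp = [0] * (max_degree + 1)
--         for n in range(max_degree + 1):
--             for m in range(n // k + 1):
--                 new_dp[n] += dp[n - m * k] * generalized_binom(qk, m)
--         dp = new_dp
--
--     return {n: dp[n] for n in range(1, max_degree + 1)}
--
-- def cumulant_inversion(bar_dims: Dict[int, int], max_degree: int = 12) -> Dict[int, int]:
--     """Inverse Euler transform: bar cohomology dimensions -> cumulant dimensions.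
--
--     Given bar cohomology dimensions b_n = dim H^n(B-bar(A)), recursively
--     solve for the primitive cumulant dimensions q_n such that:
--
--         prod_{k >= 1} 1/(1 - x^k)^{q_k} = 1 + sum_{n >= 1} b_n x^n
--
--     Recursive formula: at each degree n, the cumulant q_n equals b_n minus
--     the contribution to degree n from all cumulants at degrees < n.
--
--     This is the MOEBIUS INVERSION of the Euler transform on the cofree
--     coalgebra lattice.  The result q_n may be negative if the bar
--     cohomology does not arise from a genuine cofree structure (as happens
--     for sl_2 at degree 2 due to the Riordan correction).
--
--     Returns {n: q_n} for n = 1, ..., max_degree.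
--     """
--     q: Dict[int, int] = {}
--     for n in range(1, max_degree + 1):
--         bn = bar_dims.get(n, 0)
--         # Build partial cumulant dict with only degrees < n
--         q_partial = {k: v for k, v in q.items() if k < n}
--         # Compute cofree contribution from lower degrees
--         contribution = cofree_dimensions(q_partial, max_degree=n).get(n, 0)
--         q[n] = bn - contribution
--     return q
-- ===== SOURCE B (Python) =====
-- from math import factorial
--
-- def generalized_binom(q: int, m: int) -> int:
--     if m == 0:
--         return 1
--     if m < 0:
--         return 0
--     numerator = 1
--     for j in range(m):
--         numerator *= (q + m - 1 - j)
--     return numerator // factorial(m)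
--
-- def cumulant_inversion(bar_dims, max_degree: int = 12):
--     """Incremental inverse Euler transform: maintain ONE truncated power series
--     dp = prod_{k<n} 1/(1-x^k)^{q_k} and update it per degree, instead of
--     rebuilding the whole cofree series from scratch at every degree."""
--     q = {}
--     if max_degree < 1:
--         return q
--     dp = [0] * (max_degree + 1)
--     dp[0] = 1
--     for n in range(1, max_degree + 1):
--         qn = bar_dims.get(n, 0) - dp[n]
--         q[n] = qn
--         if qn != 0:
--             # multiply dp by 1/(1-x^n)^{qn} = sum_m binom(qn+m-1, m) x^{nm}
--             new_dp = dp[:]  # the m = 0 term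
--             for m in range(1, max_degree // n + 1):
--                 c = generalized_binom(qn, m)
--                 for j in range(m * n, max_degree + 1):
--                     new_dp[j] += dp[j - m * n] * c
--             dp = new_dp
--     return q
-- ===== Notes on version B (the rewrite author's own statement) =====
-- stated objective: faster
-- what changed: Instead of rebuilding the whole cofree power series from scratch at every degree n (calling cofree_dimensions on all lower cumulants), B maintains ONE truncated power series dp = prod_{k<n} 1/(1-x^k)^{q_k} across the loop and multiplies in the single new factor per degree, so q_n is read off as bar_dims.get(n,0) - dp[n].
import Mathlib
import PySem

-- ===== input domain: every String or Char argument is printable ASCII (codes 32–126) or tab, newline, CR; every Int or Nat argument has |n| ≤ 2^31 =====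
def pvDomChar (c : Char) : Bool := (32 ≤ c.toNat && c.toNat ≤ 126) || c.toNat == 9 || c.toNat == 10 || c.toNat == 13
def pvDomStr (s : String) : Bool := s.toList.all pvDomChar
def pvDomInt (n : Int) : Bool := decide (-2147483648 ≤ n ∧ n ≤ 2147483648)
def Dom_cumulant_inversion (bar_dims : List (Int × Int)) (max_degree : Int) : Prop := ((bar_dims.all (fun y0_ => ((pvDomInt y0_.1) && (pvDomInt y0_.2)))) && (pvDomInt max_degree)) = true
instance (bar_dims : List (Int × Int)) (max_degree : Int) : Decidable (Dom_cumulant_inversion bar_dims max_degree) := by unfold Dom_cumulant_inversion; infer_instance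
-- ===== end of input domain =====

-- B replaces A's per-degree rebuild of the whole cofree series by one incrementally
-- maintained truncated power series, updated with a single new factor per degree (faster).

-- ===== PORT A =====
-- helper generalized_binom, shared verbatim by both Python versions
def generalized_binom (q m : Int) : Int :=
  if m = 0 then 1
  else if m < 0 then 0
  else
    let numerator := (PySem.List.pyRange 0 m 1).foldl (fun acc j => acc * (q + m - 1 - j)) 1
    PySem.Int.floordiv numerator (Int.ofNat (Nat.factorial m.toNat))

-- helper cofree_dimensions (A calls it per degree); dp[0]=1 / dp[n] += … are in-range
-- list writes in every call A makes (max_degree ≥ 1), ported with the total pySetD form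
def cofree_dimensions (cumulant_dims : List (Int × Int)) (max_degree : Int) : List (Int × Int) :=
  let dp0 : List Int := PySem.List.pySetD (List.replicate (max_degree + 1).toNat 0) 0 1
  let dp := (PySem.List.pyRange 1 (max_degree + 1) 1).foldl (fun dp k =>
    let qk := (PySem.Dict.mk cumulant_dims).getD k 0
    if qk = 0 then dp
    else
      (PySem.List.pyRange 0 (max_degree + 1) 1).foldl (fun new_dp n =>
        (PySem.List.pyRange 0 (PySem.Int.floordiv n k + 1) 1).foldl (fun nd m =>
          PySem.List.pySetD nd n
            (PySem.List.pyGetD nd n 0 +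
              PySem.List.pyGetD dp (n - m * k) 0 * generalized_binom qk m)) new_dp)
        (List.replicate (max_degree + 1).toNat 0)) dp0
  (PySem.List.pyRange 1 (max_degree + 1) 1).map (fun n => (n, PySem.List.pyGetD dp n 0))

def cumulant_inversion (bar_dims : List (Int × Int)) (max_degree : Int) : List (Int × Int) :=
  ((PySem.List.pyRange 1 (max_degree + 1) 1).foldl (fun (q : PySem.Dict Int Int) n =>
    let bn := (PySem.Dict.mk bar_dims).getD n 0
    let q_partial := q.items.filter (fun kv => decide (kv.1 < n))
    let contribution := (PySem.Dict.mk (cofree_dimensions q_partial n)).getD n 0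
    q.insert n (bn - contribution)) PySem.Dict.empty).items

-- ===== PORT B =====
def cumulant_inversion_alt (bar_dims : List (Int × Int)) (max_degree : Int) : List (Int × Int) :=
  let q : PySem.Dict Int Int := PySem.Dict.empty
  if max_degree < 1 then q.items
  else
    let dp0 : List Int := PySem.List.pySetD (List.replicate (max_degree + 1).toNat 0) 0 1
    let r := (PySem.List.pyRange 1 (max_degree + 1) 1).foldl
      (fun (st : PySem.Dict Int Int × List Int) n =>
        let qn := (PySem.Dict.mk bar_dims).getD n 0 - PySem.List.pyGetD st.2 n 0
        let q' := st.1.insert n qn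
        if qn ≠ 0 then
          let new_dp := (PySem.List.pyRange 1 (PySem.Int.floordiv max_degree n + 1) 1).foldl
            (fun new_dp m =>
              let c := generalized_binom qn m
              (PySem.List.pyRange (m * n) (max_degree + 1) 1).foldl (fun nd j =>
                PySem.List.pySetD nd j
                  (PySem.List.pyGetD nd j 0 + PySem.List.pyGetD st.2 (j - m * n) 0 * c)) new_dp)
            st.2
          (q', new_dp)
        else (q', st.2)) (q, dp0)
    r.1.items

-- ===== PRECONDITION & SPEC =====
def Spec_cumulant_inversion (bar_dims : List (Int × Int)) (max_degree : Int) (out : List (Int × Int)) : Prop := out = cumulant_inversion_alt bar_dims max_degree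
instance (bar_dims : List (Int × Int)) (max_degree : Int) (out : List (Int × Int)) : Decidable (Spec_cumulant_inversion bar_dims max_degree out) := by unfold Spec_cumulant_inversion; infer_instance

-- ===== CLAIM (what is proved, stated in full; the proofs are below) =====
def Claim_equal_cumulant_inversion : Prop := ∀ (bar_dims : List (Int × Int)) (max_degree : Int), Dom_cumulant_inversion bar_dims max_degree → Spec_cumulant_inversion bar_dims max_degree (cumulant_inversion bar_dims max_degree)

-- ===== LEMMAS AND PROOFS =====

-- The mathematical model both ports are reduced to: the coefficient function of the
-- truncation-free product  prod_{k} 1/(1-x^k)^{q_k}, built factor by factor.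
def delta0 : Int → Int := fun n => if n = 0 then 1 else 0

-- multiply the series f by 1/(1-x^k)^{q}: coefficient at n
def convF (f : Int → Int) (k q : Int) : Int → Int :=
  fun n => ((PySem.List.pyRange 0 (PySem.Int.floordiv n k + 1) 1).map
    (fun m => f (n - m * k) * generalized_binom q m)).sum

-- fold the factors qs (at positions k, k+1, …) into f, skipping zero exponents
def serF : List Int → Int → (Int → Int) → (Int → Int)
  | [], _, f => f
  | qv :: rest, k, f => serF rest (k + 1) (if qv = 0 then f else convF f k qv)

-- the cumulant sequence [q_1, …, q_t] determined by the recurrence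
def qvals (bar : List (Int × Int)) : Nat → List Int
  | 0 => []
  | t + 1 => qvals bar t ++
      [(PySem.Dict.mk bar).getD ((t : Int) + 1) 0 - serF (qvals bar t) 1 delta0 ((t : Int) + 1)]

def itemsOf (bar : List (Int × Int)) (t : Nat) : List (Int × Int) :=
  (PySem.List.pyRange 1 ((t : Int) + 1) 1).map
    (fun k => (k, (qvals bar t).getD (k - 1).toNat 0))

def outF (bar : List (Int × Int)) (M : Int) : List (Int × Int) :=
  if M < 1 then [] else itemsOf bar M.toNat

-- ---- generic loop tools ----

theorem pyRange_foldl_induction {α : Type} (motive : Int → α → Prop) (f : α → Int → α)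
    (a b : Int) (init : α) (hab : a ≤ b) (h0 : motive a init)
    (hs : ∀ k x, a ≤ k → k < b → motive k x → motive (k + 1) (f x k)) :
    motive b ((PySem.List.pyRange a b 1).foldl f init) := by
  obtain ⟨d, hd⟩ : ∃ d : Nat, b = a + d := ⟨(b - a).toNat, by omega⟩
  subst hd
  clear hab
  induction d generalizing a init with
  | zero => simpa [PySem.List.pyRange_one_eq_nil (by omega : a + ((0:Nat):Int) ≤ a)] using h0
  | succ m ih =>
    rw [PySem.List.pyRange_one_cons (by push_cast; omega)]
    rw [List.foldl_cons]
    have hb : a + ((m + 1 : Nat) : Int) = (a + 1) + (m : Int) := by push_cast; ring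
    rw [hb]
    exact ih (a + 1) (f init a)
      (hs a init le_rfl (by push_cast; omega) h0)
      (fun k x hk hkb hm => hs k x (by omega) (by push_cast at hkb ⊢; omega) hm)

theorem pyGetD_pySetD_int (xs : List Int) (i j v : Int) (h0 : 0 ≤ i)
    (_hi : i < (xs.length : Int)) (hj : 0 ≤ j) (hjlt : j < (xs.length : Int)) :
    PySem.List.pyGetD (PySem.List.pySetD xs i v) j 0
      = if j = i then v else PySem.List.pyGetD xs j 0 := by
  rw [PySem.List.pySetD_of_nonneg _ _ h0]
  rw [PySem.List.pyGetD_eq_getElem _ _ hj (by simpa using hjlt)]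
  rw [PySem.List.pyGetD_eq_getElem _ _ hj hjlt]
  rw [List.getElem_set]
  split_ifs with h1 h2 h2 <;> first | rfl | omega

theorem pyGetD_replicate (L : Nat) (j : Int) :
    PySem.List.pyGetD (List.replicate L (0 : Int)) j 0 = 0 := by
  by_cases h : PySem.Raise.InRange (List.replicate L (0:Int)).length j
  · exact List.eq_of_mem_replicate (PySem.List.pyGetD_mem (List.replicate L (0:Int)) (i := j) 0 h)
  · exact PySem.List.pyGetD_of_none _ _ _ ((PySem.List.pyGet?_eq_none_iff _ _).mpr h)

-- ---- dict-as-range lemmas ----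

theorem foldl_addset (ms : List Int) (nd : List Int) (i : Int) (t : Int → Int)
    (h0 : 0 ≤ i) (hi : i < (nd.length : Int)) :
    ms.foldl (fun nd m => PySem.List.pySetD nd i (PySem.List.pyGetD nd i 0 + t m)) nd
      = PySem.List.pySetD nd i (PySem.List.pyGetD nd i 0 + (ms.map t).sum) := by
  induction ms generalizing nd with
  | nil =>
    simp only [List.foldl_nil, List.map_nil, List.sum_nil, add_zero]
    rw [PySem.List.pySetD_of_nonneg _ _ h0, PySem.List.pyGetD_eq_getElem _ _ h0 hi]
    exact (List.set_getElem_self (by omega)).symm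
  | cons m ms ih =>
    rw [List.foldl_cons]
    rw [ih _ (by simpa [PySem.List.length_pySetD] using hi)]
    rw [pyGetD_pySetD_int _ _ _ _ h0 hi h0 hi, if_pos rfl]
    rw [PySem.List.pySetD_of_nonneg _ _ h0, PySem.List.pySetD_of_nonneg _ _ h0,
        PySem.List.pySetD_of_nonneg _ _ h0, List.set_set]
    simp [add_assoc]

theorem getD_mk_map_pyRange (g : Int → Int × Int) (a b k : Int) (hg : ∀ x, (g x).1 = x)
    (h1 : a ≤ k) (h2 : k < b) :
    (PySem.Dict.mk ((PySem.List.pyRange a b 1).map g)).getD k 0 = (g k).2 := by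
  obtain ⟨d, hd⟩ : ∃ d : Nat, b = a + d := ⟨(b - a).toNat, by omega⟩
  subst hd
  induction d generalizing a with
  | zero => omega
  | succ m ih =>
    rw [PySem.List.pyRange_one_cons (by push_cast; omega), List.map_cons]
    rw [PySem.Dict.getD_eq_get?_getD]
    rcases eq_or_ne k a with rfl | hne
    · rw [show g k = (k, (g k).2) from by apply Prod.ext <;> simp [hg]]
      rw [PySem.Dict.get?_mk_cons]
      simp
    · rw [show g a = (a, (g a).2) from by apply Prod.ext <;> simp [hg]]
      rw [PySem.Dict.get?_mk_cons]
      rw [if_neg (by simpa using (Ne.symm hne))]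
      rw [← PySem.Dict.getD_eq_get?_getD]
      have hb : a + ((m + 1 : Nat) : Int) = (a + 1) + (m : Int) := by push_cast; ring
      rw [hb] at h2 ⊢
      exact ih (a + 1) (by omega) h2

theorem getD_mk_map_pyRange_out (g : Int → Int × Int) (a b k : Int) (hg : ∀ x, (g x).1 = x)
    (h : k < a ∨ b ≤ k) :
    (PySem.Dict.mk ((PySem.List.pyRange a b 1).map g)).getD k 0 = 0 := by
  rw [PySem.Dict.getD_eq_get?_getD]
  suffices hs : (PySem.Dict.mk ((PySem.List.pyRange a b 1).map g)).get? k = none by rw [hs]; rfl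
  rw [PySem.Dict.get?_eq_none_iff_not_mem_keys]
  intro hm
  simp only [PySem.Dict.keys_mk, List.map_map, List.mem_map] at hm
  obtain ⟨x, hx, hxx⟩ := hm
  rw [PySem.List.mem_pyRange_one] at hx
  have hgx : (g x).1 = x := hg x
  simp [Function.comp] at hxx
  omega

theorem contains_mk_map_pyRange_out (g : Int → Int × Int) (a b k : Int) (hg : ∀ x, (g x).1 = x)
    (h : k < a ∨ b ≤ k) :
    (PySem.Dict.mk ((PySem.List.pyRange a b 1).map g)).contains k = false := by
  rw [PySem.Dict.contains_eq_isSome_get?]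
  suffices hs : (PySem.Dict.mk ((PySem.List.pyRange a b 1).map g)).get? k = none by simp [hs]
  rw [PySem.Dict.get?_eq_none_iff_not_mem_keys]
  intro hm
  simp only [PySem.Dict.keys_mk, List.map_map, List.mem_map] at hm
  obtain ⟨x, hx, hxx⟩ := hm
  rw [PySem.List.mem_pyRange_one] at hx
  have hgx : (g x).1 = x := hg x
  simp [Function.comp] at hxx
  omega

-- ---- model facts ----

theorem generalized_binom_zero (q : Int) : generalized_binom q 0 = 1 := by
  simp [generalized_binom]

theorem convF_congr (f g : Int → Int) (k q n : Int) (hk : 1 ≤ k) (_hn : 0 ≤ n)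
    (h : ∀ i, 0 ≤ i → i ≤ n → f i = g i) : convF f k q n = convF g k q n := by
  unfold convF
  congr 1
  apply List.map_congr_left
  intro m hm
  rw [PySem.List.mem_pyRange_one] at hm
  have hmk : m * k ≤ n := by
    have := (PySem.Int.le_floordiv_iff_mul_le (a := n) (b := k) (q := m) (by omega)).mp (by omega)
    omega
  have hmk0 : 0 ≤ m * k := mul_nonneg hm.1 (by omega)
  rw [h (n - m * k) (by omega) (by omega)]

theorem serF_append (qs : List Int) (qv : Int) (k : Int) (f : Int → Int) :
    serF (qs ++ [qv]) k f
      = if qv = 0 then serF qs k f else convF (serF qs k f) (k + qs.length) qv := by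
  induction qs generalizing k f with
  | nil => simp [serF]
  | cons q qs ih =>
    rw [List.cons_append]
    show serF (qs ++ [qv]) (k + 1) (if q = 0 then f else convF f k q) = _
    rw [ih]
    have hl : (k + 1) + (qs.length : Int) = k + ((q :: qs).length : Int) := by
      simp; ring
    rw [hl]
    rfl

theorem qvals_length (bar : List (Int × Int)) (t : Nat) : (qvals bar t).length = t := by
  induction t with
  | zero => rfl
  | succ t ih => simp [qvals, ih]

-- ---- the two multiply-step characterizations ----

theorem A_mul (dp : List Int) (N k qk : Int) (_hk : 1 ≤ k) (hN : 0 ≤ N)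
    (_hlen : dp.length = (N + 1).toNat) :
    let res := (PySem.List.pyRange 0 (N + 1) 1).foldl (fun new_dp n =>
      (PySem.List.pyRange 0 (PySem.Int.floordiv n k + 1) 1).foldl (fun nd m =>
        PySem.List.pySetD nd n
          (PySem.List.pyGetD nd n 0 +
            PySem.List.pyGetD dp (n - m * k) 0 * generalized_binom qk m)) new_dp)
      (List.replicate (N + 1).toNat 0)
    res.length = (N + 1).toNat ∧ ∀ j : Int, 0 ≤ j → j ≤ N →
      PySem.List.pyGetD res j 0 = convF (fun i => PySem.List.pyGetD dp i 0) k qk j := by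
  intro res
  have key := pyRange_foldl_induction
    (motive := fun n nd => nd.length = (N + 1).toNat ∧
      (∀ j : Int, 0 ≤ j → j < n →
        PySem.List.pyGetD nd j 0 = convF (fun i => PySem.List.pyGetD dp i 0) k qk j) ∧
      (∀ j : Int, n ≤ j → j ≤ N → PySem.List.pyGetD nd j 0 = 0))
    (fun new_dp n =>
      (PySem.List.pyRange 0 (PySem.Int.floordiv n k + 1) 1).foldl (fun nd m =>
        PySem.List.pySetD nd n
          (PySem.List.pyGetD nd n 0 +
            PySem.List.pyGetD dp (n - m * k) 0 * generalized_binom qk m)) new_dp)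
    0 (N + 1) (List.replicate (N + 1).toNat 0) (by omega)
    ⟨by simp, fun j hj hlt => by omega, fun j _ _ => pyGetD_replicate _ _⟩
    ?step
  · exact ⟨key.1, fun j hj hjN => key.2.1 j hj (by omega)⟩
  case step =>
    intro n nd h0n hnN hm
    obtain ⟨hlen', hlt, hge⟩ := hm
    dsimp only
    have hndlen : n < (nd.length : Int) := by rw [hlen']; omega
    rw [foldl_addset _ _ _ _ h0n hndlen]
    rw [hge n le_rfl (by omega), zero_add]
    refine ⟨by rw [PySem.List.length_pySetD, hlen'], ?_, ?_⟩
    · intro j hj hjn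
      have hjlt : j < (nd.length : Int) := by rw [hlen']; omega
      rw [pyGetD_pySetD_int _ _ _ _ h0n hndlen hj hjlt]
      rcases eq_or_ne j n with rfl | hne
      · rw [if_pos rfl]; rfl
      · rw [if_neg hne]; exact hlt j hj (by omega)
    · intro j hjn hjN
      have hjlt : j < (nd.length : Int) := by rw [hlen']; omega
      rw [pyGetD_pySetD_int _ _ _ _ h0n hndlen (by omega) hjlt]
      rw [if_neg (by omega)]
      exact hge j (by omega) hjN

theorem foldl_setrange (nd : List Int) (u : Int → Int) (lo hi : Int) (hlo : 0 ≤ lo)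
    (hlohi : lo ≤ hi) (hhi : hi ≤ (nd.length : Int)) :
    let res := (PySem.List.pyRange lo hi 1).foldl (fun nd j =>
      PySem.List.pySetD nd j (PySem.List.pyGetD nd j 0 + u j)) nd
    res.length = nd.length ∧ ∀ j : Int, 0 ≤ j → j < (nd.length : Int) →
      PySem.List.pyGetD res j 0
        = PySem.List.pyGetD nd j 0 + (if lo ≤ j ∧ j < hi then u j else 0) := by
  intro res
  have key := pyRange_foldl_induction
    (motive := fun j' nd' => nd'.length = nd.length ∧ ∀ j : Int, 0 ≤ j → j < (nd.length : Int) →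
      PySem.List.pyGetD nd' j 0
        = PySem.List.pyGetD nd j 0 + (if lo ≤ j ∧ j < j' then u j else 0))
    (fun nd j => PySem.List.pySetD nd j (PySem.List.pyGetD nd j 0 + u j))
    lo hi nd hlohi
    ⟨rfl, fun j hj hjl => by rw [if_neg (by omega), add_zero]⟩
    ?step
  · exact key
  case step =>
    intro j' nd' hj'lo hj'hi hm
    obtain ⟨hlen', hprev⟩ := hm
    have hj'lt : j' < (nd'.length : Int) := by rw [hlen']; omega
    refine ⟨by rw [PySem.List.length_pySetD, hlen'], ?_⟩
    intro j hj hjlt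
    rw [pyGetD_pySetD_int _ _ _ _ (by omega) hj'lt hj (by rw [hlen']; exact hjlt)]
    rcases eq_or_ne j j' with rfl | hne
    · rw [if_pos rfl, hprev j hj hjlt, if_neg (by omega), add_zero, if_pos (by omega)]
    · rw [if_neg hne, hprev j hj hjlt]
      by_cases hcase : lo ≤ j ∧ j < j'
      · rw [if_pos hcase, if_pos (by omega)]
      · rw [if_neg hcase, if_neg (by omega)]

theorem B_mul (dp : List Int) (M n qn : Int) (hn : 1 ≤ n) (hM : n ≤ M)
    (hlen : dp.length = (M + 1).toNat) :
    let res := (PySem.List.pyRange 1 (PySem.Int.floordiv M n + 1) 1).foldl (fun new_dp m =>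
      (PySem.List.pyRange (m * n) (M + 1) 1).foldl (fun nd j =>
        PySem.List.pySetD nd j
          (PySem.List.pyGetD nd j 0 +
            PySem.List.pyGetD dp (j - m * n) 0 * generalized_binom qn m)) new_dp) dp
    res.length = (M + 1).toNat ∧ ∀ j : Int, 0 ≤ j → j ≤ M →
      PySem.List.pyGetD res j 0 = convF (fun i => PySem.List.pyGetD dp i 0) n qn j := by
  intro res
  have hn0 : (0:Int) < n := by omega
  have hMn0 : 0 ≤ PySem.Int.floordiv M n :=
    (PySem.Int.le_floordiv_iff_mul_le hn0).mpr (by omega)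
  have hfd : ∀ j : Int, 0 ≤ j → 0 ≤ PySem.Int.floordiv j n :=
    fun j hj => (PySem.Int.le_floordiv_iff_mul_le hn0).mpr (by omega)
  have key := pyRange_foldl_induction
    (motive := fun m nd => nd.length = (M + 1).toNat ∧ ∀ j : Int, 0 ≤ j → j ≤ M →
      PySem.List.pyGetD nd j 0
        = ((PySem.List.pyRange 0 (min m (PySem.Int.floordiv j n + 1)) 1).map
            (fun m' => PySem.List.pyGetD dp (j - m' * n) 0 * generalized_binom qn m')).sum)
    (fun new_dp m =>
      (PySem.List.pyRange (m * n) (M + 1) 1).foldl (fun nd j =>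
        PySem.List.pySetD nd j
          (PySem.List.pyGetD nd j 0 +
            PySem.List.pyGetD dp (j - m * n) 0 * generalized_binom qn m)) new_dp)
    1 (PySem.Int.floordiv M n + 1) dp (by omega)
    ?base ?step
  · refine ⟨key.1, fun j hj hjM => ?_⟩
    rw [key.2 j hj hjM]
    have hjM' : PySem.Int.floordiv j n ≤ PySem.Int.floordiv M n := by
      rw [PySem.Int.floordiv_eq_ediv_of_pos hn0, PySem.Int.floordiv_eq_ediv_of_pos hn0]
      exact Int.ediv_le_ediv hn0 hjM
    rw [min_eq_right (by omega)]
    rfl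
  case base =>
    refine ⟨hlen, fun j hj hjM => ?_⟩
    rw [min_eq_left (by have := hfd j hj; omega)]
    have h01 : PySem.List.pyRange 0 1 1 = [0] := by decide
    rw [h01]
    simp [generalized_binom_zero]
  case step =>
    intro m nd h1m hmlt hmot
    obtain ⟨hlen', hprev⟩ := hmot
    have hmn : m * n ≤ M := (PySem.Int.le_floordiv_iff_mul_le hn0).mp (by omega)
    have hmn0 : 0 ≤ m * n := mul_nonneg (by omega) (by omega)
    have hset := foldl_setrange nd
      (fun j => PySem.List.pyGetD dp (j - m * n) 0 * generalized_binom qn m)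
      (m * n) (M + 1) hmn0 (by omega) (by rw [hlen']; omega)
    refine ⟨by rw [hset.1, hlen'], fun j hj hjM => ?_⟩
    rw [hset.2 j hj (by rw [hlen']; omega), hprev j hj hjM]
    by_cases hcase : m * n ≤ j
    · have hmj : m ≤ PySem.Int.floordiv j n := (PySem.Int.le_floordiv_iff_mul_le hn0).mpr hcase
      rw [if_pos (by omega)]
      rw [min_eq_left (by omega), min_eq_left (by omega)]
      rw [PySem.List.pyRange_one_succ_right (by omega), List.map_append, List.sum_append]
      simp
    · have hmj : PySem.Int.floordiv j n < m := by
        rw [PySem.Int.floordiv_lt_iff_lt_mul hn0]; omega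
      rw [if_neg (by omega), add_zero]
      rw [min_eq_right (by omega), min_eq_right (by omega)]

-- ---- per-port characterizations ----

theorem cofree_char (cd : List (Int × Int)) (N : Int) (hN : 1 ≤ N) (j : Int)
    (h1 : 1 ≤ j) (hj : j ≤ N) :
    (PySem.Dict.mk (cofree_dimensions cd N)).getD j 0
      = serF ((PySem.List.pyRange 1 (N + 1) 1).map (fun k => (PySem.Dict.mk cd).getD k 0))
          1 delta0 j := by
  have hdp := pyRange_foldl_induction
    (motive := fun k dp => dp.length = (N + 1).toNat ∧ ∀ i : Int, 0 ≤ i → i ≤ N →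
      PySem.List.pyGetD dp i 0
        = serF ((PySem.List.pyRange 1 k 1).map (fun x => (PySem.Dict.mk cd).getD x 0))
            1 delta0 i)
    (fun dp k =>
      let qk := (PySem.Dict.mk cd).getD k 0
      if qk = 0 then dp
      else
        (PySem.List.pyRange 0 (N + 1) 1).foldl (fun new_dp n =>
          (PySem.List.pyRange 0 (PySem.Int.floordiv n k + 1) 1).foldl (fun nd m =>
            PySem.List.pySetD nd n
              (PySem.List.pyGetD nd n 0 +
                PySem.List.pyGetD dp (n - m * k) 0 * generalized_binom qk m)) new_dp)
          (List.replicate (N + 1).toNat 0))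
    1 (N + 1) (PySem.List.pySetD (List.replicate (N + 1).toNat 0) 0 1) (by omega)
    ?base ?step
  case base =>
    constructor
    · rw [PySem.List.length_pySetD, List.length_replicate]
    · intro i hi hiN
      rw [PySem.List.pyRange_one_eq_nil le_rfl, List.map_nil]
      show _ = delta0 i
      rw [pyGetD_pySetD_int _ _ _ _ le_rfl (by simp; omega) hi (by simp; omega)]
      rcases eq_or_ne i 0 with rfl | hne
      · simp [delta0]
      · rw [if_neg hne, pyGetD_replicate]
        simp [delta0, hne]
  case step =>
    intro k dp h1k hkN hmot
    obtain ⟨hlen, hinv⟩ := hmot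
    dsimp only
    have hsplit : PySem.List.pyRange 1 (k + 1) 1 = PySem.List.pyRange 1 k 1 ++ [k] :=
      PySem.List.pyRange_one_succ_right h1k
    have hpos : (1:Int) + (((PySem.List.pyRange 1 k 1).map
        (fun x => (PySem.Dict.mk cd).getD x 0)).length : Int) = k := by
      rw [List.length_map, PySem.List.length_pyRange_one]; omega
    by_cases hq : (PySem.Dict.mk cd).getD k 0 = 0
    · rw [if_pos hq]
      refine ⟨hlen, fun i hi hiN => ?_⟩
      rw [hsplit, List.map_append, List.map_cons, List.map_nil, serF_append, if_pos hq]
      exact hinv i hi hiN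
    · rw [if_neg hq]
      have hA := A_mul dp N k ((PySem.Dict.mk cd).getD k 0) h1k (by omega) hlen
      refine ⟨hA.1, fun i hi hiN => ?_⟩
      rw [hA.2 i hi hiN]
      rw [hsplit, List.map_append, List.map_cons, List.map_nil, serF_append, if_neg hq, hpos]
      exact convF_congr _ _ _ _ _ h1k hi (fun x hx hxi => hinv x hx (by omega))
  show (PySem.Dict.mk ((PySem.List.pyRange 1 (N + 1) 1).map
      (fun n => (n, PySem.List.pyGetD _ n 0)))).getD j 0 = _
  rw [getD_mk_map_pyRange _ 1 (N + 1) j (fun x => rfl) h1 (by omega)]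
  exact hdp.2 j (by omega) hj

theorem itemsOf_succ (bar : List (Int × Int)) (t : Nat) :
    itemsOf bar (t + 1) = itemsOf bar t ++
      [((t : Int) + 1, (PySem.Dict.mk bar).getD ((t : Int) + 1) 0
          - serF (qvals bar t) 1 delta0 ((t : Int) + 1))] := by
  have hq : qvals bar (t + 1) = qvals bar t ++
      [(PySem.Dict.mk bar).getD ((t : Int) + 1) 0
        - serF (qvals bar t) 1 delta0 ((t : Int) + 1)] := rfl
  unfold itemsOf
  have hc : (((t + 1 : Nat) : Int)) + 1 = ((t : Int) + 1) + 1 := by push_cast; ring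
  rw [hc, PySem.List.pyRange_one_succ_right (by omega : (1:Int) ≤ (t : Int) + 1),
    List.map_append, List.map_cons, List.map_nil]
  congr 1
  · apply List.map_congr_left
    intro k hk
    rw [PySem.List.mem_pyRange_one] at hk
    have hklt : (k - 1).toNat < (qvals bar t).length := by rw [qvals_length]; omega
    rw [hq, List.getD_append _ _ _ _ hklt]
  · have ht1 : (((t : Int) + 1) - 1).toNat = (qvals bar t).length := by rw [qvals_length]; omega
    rw [hq, ht1]
    simp [List.getD]

theorem serF_qvals_succ (bar : List (Int × Int)) (t : Nat) :
    serF (qvals bar (t + 1)) 1 delta0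
      = (if (PySem.Dict.mk bar).getD ((t : Int) + 1) 0
            - serF (qvals bar t) 1 delta0 ((t : Int) + 1) = 0
         then serF (qvals bar t) 1 delta0
         else convF (serF (qvals bar t) 1 delta0) ((t : Int) + 1)
           ((PySem.Dict.mk bar).getD ((t : Int) + 1) 0
             - serF (qvals bar t) 1 delta0 ((t : Int) + 1))) := by
  show serF (qvals bar t ++ [_]) 1 delta0 = _
  rw [serF_append, qvals_length, add_comm 1 (t : Int)]

theorem insert_itemsOf (bar : List (Int × Int)) (t : Nat) (v : Int) :
    (PySem.Dict.mk (itemsOf bar t)).insert ((t : Int) + 1) v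
      = PySem.Dict.mk (itemsOf bar t ++ [((t : Int) + 1, v)]) := by
  have hc : (PySem.Dict.mk (itemsOf bar t)).contains ((t : Int) + 1) = false := by
    unfold itemsOf
    exact contains_mk_map_pyRange_out _ 1 ((t : Int) + 1) _ (fun x => rfl) (Or.inr le_rfl)
  apply PySem.Dict.ext
  rw [PySem.Dict.items_insert_of_not_contains _ _ hc]

theorem map_getD_itemsOf (bar : List (Int × Int)) (t : Nat) :
    (PySem.List.pyRange 1 ((t : Int) + 1) 1).map
      (fun k => (PySem.Dict.mk (itemsOf bar t)).getD k 0) = qvals bar t := by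
  apply List.ext_getElem
  · rw [List.length_map, PySem.List.length_pyRange_one, qvals_length]; omega
  · intro i h1 h2
    rw [List.getElem_map, PySem.List.getElem_pyRange_one]
    have hib : i < t := by
      rw [List.length_map, PySem.List.length_pyRange_one] at h1; omega
    have := getD_mk_map_pyRange
      (fun k => (k, (qvals bar t).getD (k - 1).toNat 0)) 1 ((t : Int) + 1) (1 + (i : Int))
      (fun x => rfl) (by omega) (by omega)
    rw [show (PySem.Dict.mk (itemsOf bar t)) = PySem.Dict.mk ((PySem.List.pyRange 1 ((t:Int)+1) 1).map
      (fun k => (k, (qvals bar t).getD (k - 1).toNat 0))) from rfl, this]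
    dsimp only
    have hi1 : ((1 : Int) + (i : Int) - 1).toNat = i := by omega
    rw [hi1]
    rw [List.getD_eq_getElem?_getD, List.getElem?_eq_getElem (by rw [qvals_length]; omega)]
    rfl

theorem A_char (bar : List (Int × Int)) (M : Int) :
    cumulant_inversion bar M = outF bar M := by
  unfold cumulant_inversion outF
  rcases lt_or_ge M 1 with hM | hM
  · rw [if_pos hM, PySem.List.pyRange_one_eq_nil (by omega)]
    rfl
  · rw [if_neg (by omega)]
    have key := pyRange_foldl_induction
      (motive := fun n q => ∃ t : Nat, n = (t : Int) + 1 ∧ q = PySem.Dict.mk (itemsOf bar t))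
      (fun (q : PySem.Dict Int Int) n =>
        let bn := (PySem.Dict.mk bar).getD n 0
        let q_partial := q.items.filter (fun kv => decide (kv.1 < n))
        let contribution := (PySem.Dict.mk (cofree_dimensions q_partial n)).getD n 0
        q.insert n (bn - contribution))
      1 (M + 1) PySem.Dict.empty (by omega)
      ⟨0, by norm_num, by
        apply PySem.Dict.ext
        show _ = itemsOf bar 0
        unfold itemsOf
        rw [PySem.List.pyRange_one_eq_nil (by norm_num)]
        rfl⟩
      ?step
    · obtain ⟨t, ht, hq⟩ := key
      have htM : t = M.toNat := by omega
      subst htM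
      rw [hq]
    case step =>
      intro n q h1n hnM hmot
      obtain ⟨t, rfl, rfl⟩ := hmot
      beta_reduce
      have hfil : (PySem.Dict.mk (itemsOf bar t)).items.filter
          (fun kv => decide (kv.1 < (t : Int) + 1)) = itemsOf bar t := by
        apply List.filter_eq_self.mpr
        intro kv hkv
        unfold itemsOf at hkv
        obtain ⟨k, hk, rfl⟩ := List.mem_map.mp hkv
        rw [PySem.List.mem_pyRange_one] at hk
        simp only [decide_eq_true_eq]
        omega
      have hz : (PySem.Dict.mk (itemsOf bar t)).getD ((t : Int) + 1) 0 = 0 := by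
        unfold itemsOf
        exact getD_mk_map_pyRange_out _ 1 _ _ (fun x => rfl) (Or.inr le_rfl)
      have hcont : (PySem.Dict.mk (cofree_dimensions (itemsOf bar t) ((t : Int) + 1))).getD
          ((t : Int) + 1) 0 = serF (qvals bar t) 1 delta0 ((t : Int) + 1) := by
        rw [cofree_char _ _ (by omega) _ (by omega) le_rfl]
        rw [PySem.List.pyRange_one_succ_right (by omega : (1 : Int) ≤ (t : Int) + 1),
          List.map_append, List.map_cons, List.map_nil, serF_append]
        rw [if_pos hz, map_getD_itemsOf]
      refine ⟨t + 1, by push_cast; ring, ?_⟩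
      rw [hfil]
      show (PySem.Dict.mk (itemsOf bar t)).insert ((t : Int) + 1)
          ((PySem.Dict.mk bar).getD ((t : Int) + 1) 0
            - (PySem.Dict.mk (cofree_dimensions (itemsOf bar t) ((t : Int) + 1))).getD
                ((t : Int) + 1) 0)
        = PySem.Dict.mk (itemsOf bar (t + 1))
      rw [hcont, insert_itemsOf, itemsOf_succ]

theorem B_char (bar : List (Int × Int)) (M : Int) :
    cumulant_inversion_alt bar M = outF bar M := by
  unfold cumulant_inversion_alt outF
  rcases lt_or_ge M 1 with hM | hM
  · rw [if_pos hM, if_pos hM]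
    rfl
  · rw [if_neg (by omega), if_neg (by omega)]
    have key := pyRange_foldl_induction
      (motive := fun n (st : PySem.Dict Int Int × List Int) => ∃ t : Nat,
        n = (t : Int) + 1 ∧ st.1 = PySem.Dict.mk (itemsOf bar t) ∧
        st.2.length = (M + 1).toNat ∧ ∀ j : Int, 0 ≤ j → j ≤ M →
          PySem.List.pyGetD st.2 j 0 = serF (qvals bar t) 1 delta0 j)
      (fun (st : PySem.Dict Int Int × List Int) n =>
        let qn := (PySem.Dict.mk bar).getD n 0 - PySem.List.pyGetD st.2 n 0
        let q' := st.1.insert n qn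
        if qn ≠ 0 then
          let new_dp := (PySem.List.pyRange 1 (PySem.Int.floordiv M n + 1) 1).foldl
            (fun new_dp m =>
              let c := generalized_binom qn m
              (PySem.List.pyRange (m * n) (M + 1) 1).foldl (fun nd j =>
                PySem.List.pySetD nd j
                  (PySem.List.pyGetD nd j 0 + PySem.List.pyGetD st.2 (j - m * n) 0 * c)) new_dp)
            st.2
          (q', new_dp)
        else (q', st.2))
      1 (M + 1) (PySem.Dict.empty, PySem.List.pySetD (List.replicate (M + 1).toNat 0) 0 1)
      (by omega)
      ⟨0, by norm_num, by
        apply PySem.Dict.ext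
        show _ = itemsOf bar 0
        unfold itemsOf
        rw [PySem.List.pyRange_one_eq_nil (by norm_num)]
        rfl, by
        rw [PySem.List.length_pySetD, List.length_replicate], by
        intro j hj hjM
        show _ = delta0 j
        rw [pyGetD_pySetD_int _ _ _ _ le_rfl (by simp; omega) hj (by simp; omega)]
        rcases eq_or_ne j 0 with rfl | hne
        · simp [delta0]
        · rw [if_neg hne, pyGetD_replicate]
          simp [delta0, hne]⟩
      ?step
    · obtain ⟨t, ht, hq, _, _⟩ := key
      have htM : t = M.toNat := by omega
      subst htM
      exact congrArg PySem.Dict.items hq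
    case step =>
      intro n st h1n hnM hmot
      obtain ⟨t, rfl, hq, hlen, hinv⟩ := hmot
      beta_reduce
      have hqn : (PySem.Dict.mk bar).getD ((t : Int) + 1) 0
            - PySem.List.pyGetD st.2 ((t : Int) + 1) 0
          = (PySem.Dict.mk bar).getD ((t : Int) + 1) 0
            - serF (qvals bar t) 1 delta0 ((t : Int) + 1) := by
        rw [hinv ((t : Int) + 1) (by omega) (by omega)]
      have hins : st.1.insert ((t : Int) + 1)
            ((PySem.Dict.mk bar).getD ((t : Int) + 1) 0
              - PySem.List.pyGetD st.2 ((t : Int) + 1) 0)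
          = PySem.Dict.mk (itemsOf bar (t + 1)) := by
        rw [hq, hqn, insert_itemsOf, itemsOf_succ]
      by_cases hz : (PySem.Dict.mk bar).getD ((t : Int) + 1) 0
          - PySem.List.pyGetD st.2 ((t : Int) + 1) 0 = 0
      · rw [if_neg (by simpa using hz)]
        refine ⟨t + 1, by push_cast; ring, hins, hlen, ?_⟩
        intro j hj hjM
        rw [serF_qvals_succ, if_pos (by rw [← hqn]; exact hz)]
        exact hinv j hj hjM
      · rw [if_pos (by simpa using hz)]
        have hB := B_mul st.2 M ((t : Int) + 1)
          ((PySem.Dict.mk bar).getD ((t : Int) + 1) 0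
            - PySem.List.pyGetD st.2 ((t : Int) + 1) 0)
          (by omega) (by omega) hlen
        refine ⟨t + 1, by push_cast; ring, hins, hB.1, ?_⟩
        intro j hj hjM
        rw [hB.2 j hj hjM]
        rw [serF_qvals_succ, if_neg (by rw [← hqn]; exact hz)]
        rw [hqn]
        exact convF_congr _ _ _ _ _ (by omega) hj (fun x hx hxj => hinv x hx (by omega))

-- ===== VERDICT (by name: the statement is the Claim_ definition above) =====
theorem cumulant_inversion_spec : Claim_equal_cumulant_inversion := by
  intro bar M _
  unfold Spec_cumulant_inversion
  rw [A_char, B_char]
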